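-- pv_equiv track=rewrite | github.com/algoORgoal/big-o-brownies | 프로그래머스/2/87946. 피로도/피로도.py | solution
-- ===== SOURCE A (Python) =====
-- from itertools import permutations
--
-- def solution(k, dungeons):
--     max_visit_count = 0
--     for i in range(0, len(dungeons) + 1):
--         for combo in permutations(dungeons[0:i]):
--             stamina = k
--             visit_count = 0
--             for required, cost in combo:
--                 if stamina >= required:
--                     stamina -= cost
--                     visit_count += 1
--                 else:
--                     break
--             max_visit_count = max(visit_count, max_visit_count)
--     return max_visit_count
--
--
--
--
--
--
--     answer = 0
--     return answer
-- ===== SOURCE B (Python) =====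
-- def solution(k, dungeons):
--     def dfs(stamina, rem):
--         best = 0
--         pre = []
--         post = rem
--         while post:
--             req, cost = post[0]
--             post = post[1:]
--             if stamina >= req:
--                 best = max(best, 1 + dfs(stamina - cost, pre + post))
--             pre = pre + [(req, cost)]
--         return best
--     return dfs(k, dungeons)
-- ===== Notes on version B (the rewrite author's own statement) =====
-- stated objective: alternative
-- what changed: Replaced the enumeration of all permutations of every prefix (itertools.permutations with an inner break-loop) by a recursive backtracking search that extends only feasible visit sequences, pruning orderings whose next dungeon is unaffordable.
import Mathlib
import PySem

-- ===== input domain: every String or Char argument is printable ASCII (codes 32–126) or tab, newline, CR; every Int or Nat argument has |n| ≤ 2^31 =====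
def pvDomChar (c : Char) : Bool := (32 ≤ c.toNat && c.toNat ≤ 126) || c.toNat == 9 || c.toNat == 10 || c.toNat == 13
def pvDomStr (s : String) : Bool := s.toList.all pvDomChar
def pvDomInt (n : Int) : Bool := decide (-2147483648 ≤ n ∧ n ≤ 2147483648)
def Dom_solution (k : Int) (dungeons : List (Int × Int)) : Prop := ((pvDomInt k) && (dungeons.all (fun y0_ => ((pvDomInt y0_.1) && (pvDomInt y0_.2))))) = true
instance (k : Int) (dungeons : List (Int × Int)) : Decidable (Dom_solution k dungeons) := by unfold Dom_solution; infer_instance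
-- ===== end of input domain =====

-- B replaces A's enumeration of all permutations of every prefix by a recursive
-- backtracking search that only extends feasible visit sequences (an alternative algorithm).

-- ===== PORT A =====
-- the inner 'for required, cost in combo' loop with its break
def innerLoopA (stamina visit : Int) : List (Int × Int) → Int
  | [] => visit
  | (required, cost) :: t =>
      if stamina ≥ required then innerLoopA (stamina - cost) (visit + 1) t else visit

def solution (k : Int) (dungeons : List (Int × Int)) : Int :=
  (PySem.List.pyRange 0 (PySem.List.len dungeons + 1) 1).foldl
    (fun maxVisit i =>
      ((PySem.List.slice dungeons (some 0) (some i)).permutations).foldl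
        (fun mv combo => max (innerLoopA k 0 combo) mv) maxVisit) 0

-- ===== PORT B =====
-- Source B's dfs: walk 'post', keeping the already-passed elements in 'pre';
-- for each affordable head recurse on 'pre ++ rest-of-post'.
def dfsGo (k : Int) (pre post : List (Int × Int)) (best : Int) : Int :=
  match post with
  | [] => best
  | (req, cost) :: t =>
      let best' := if k ≥ req then max best (1 + dfsGo (k - cost) [] (pre ++ t) 0) else best
      dfsGo k (pre ++ [(req, cost)]) t best'
termination_by (pre.length + post.length, post.length)
decreasing_by
  · simp; omega
  · simp; omega

def solution_alt (k : Int) (dungeons : List (Int × Int)) : Int := dfsGo k [] dungeons 0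

-- ===== PRECONDITION & SPEC =====
def Spec_solution (k : Int) (dungeons : List (Int × Int)) (out : Int) : Prop := out = solution_alt k dungeons
instance (k : Int) (dungeons : List (Int × Int)) (out : Int) : Decidable (Spec_solution k dungeons out) := by unfold Spec_solution; infer_instance

-- ===== CLAIM (what is proved, stated in full; the proofs are below) =====
def Claim_equal_solution : Prop := ∀ (k : Int) (dungeons : List (Int × Int)), Dom_solution k dungeons → Spec_solution k dungeons (solution k dungeons)

-- ===== LEMMAS AND PROOFS =====

-- the value of the inner break-loop, started at 0: the length of the feasible prefix
def chain (k : Int) : List (Int × Int) → Int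
  | [] => 0
  | (r, c) :: t => if k ≥ r then 1 + chain (k - c) t else 0

-- max of 'chain k' over all permutations of L (the common specification)
def mperm (k : Int) (L : List (Int × Int)) : Int :=
  L.permutations.foldl (fun a q => max (chain k q) a) 0

-- generic running-max lemmas for the fold shape 'max (g x) a'
theorem fm_base {α : Type} (g : α → Int) (xs : List α) (b : Int) :
    b ≤ xs.foldl (fun a x => max (g x) a) b := by
  induction xs generalizing b with
  | nil => exact le_refl b
  | cons x t ih => exact le_trans (le_max_right _ _) (ih _)

theorem fm_mem {α : Type} (g : α → Int) {xs : List α} {x : α} (hx : x ∈ xs) (b : Int) :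
    g x ≤ xs.foldl (fun a y => max (g y) a) b := by
  induction xs generalizing b with
  | nil => cases hx
  | cons y t ih =>
      rcases List.mem_cons.1 hx with h | h
      · subst h; exact le_trans (le_max_left _ _) (fm_base g t _)
      · exact ih h _

theorem fm_le {α : Type} (g : α → Int) (xs : List α) (c : Int) :
    ∀ b, b ≤ c → (∀ x ∈ xs, g x ≤ c) →
      xs.foldl (fun a x => max (g x) a) b ≤ c := by
  induction xs with
  | nil => intro b hb _; exact hb
  | cons x t ih =>
      intro b hb h
      exact ih _ (max_le (h x List.mem_cons_self) hb)
        (fun y hy => h y (List.mem_cons_of_mem _ hy))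

theorem fm_attain {α : Type} (g : α → Int) (xs : List α) (b : Int) :
    xs.foldl (fun a x => max (g x) a) b = b ∨ ∃ x ∈ xs, xs.foldl (fun a y => max (g y) a) b = g x := by
  induction xs generalizing b with
  | nil => exact Or.inl rfl
  | cons x t ih =>
      rcases ih (max (g x) b) with h | ⟨y, hy, hv⟩
      · simp only [List.foldl_cons] at *
        rcases max_choice (g x) b with hm | hm
        · exact Or.inr ⟨x, List.mem_cons_self, by rw [h, hm]⟩
        · exact Or.inl (by rw [h, hm])
      · exact Or.inr ⟨y, List.mem_cons_of_mem _ hy, hv⟩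

theorem chain_nonneg (k : Int) (q : List (Int × Int)) : 0 ≤ chain k q := by
  induction q generalizing k with
  | nil => simp [chain]
  | cons x t ih =>
      obtain ⟨r, c⟩ := x
      simp only [chain]
      split
      · have := ih (k - c); omega
      · exact le_refl 0

theorem chain_append_le (k : Int) (q s : List (Int × Int)) :
    chain k q ≤ chain k (q ++ s) := by
  induction q generalizing k with
  | nil => simpa [chain] using chain_nonneg k s
  | cons x t ih =>
      obtain ⟨r, c⟩ := x
      simp only [chain, List.cons_append]
      split
      · have := ih (k - c); omega
      · exact le_refl 0

theorem innerLoopA_eq (s v : Int) (l : List (Int × Int)) :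
    innerLoopA s v l = v + chain s l := by
  induction l generalizing s v with
  | nil => simp [innerLoopA, chain]
  | cons x t ih =>
      obtain ⟨r, c⟩ := x
      simp only [innerLoopA, chain]
      split
      · rw [ih]; ring
      · ring

theorem dfsGo_max (k : Int) (post : List (Int × Int)) :
    ∀ (pre : List (Int × Int)) (a b : Int),
      dfsGo k pre post (max a b) = max a (dfsGo k pre post b) := by
  induction post with
  | nil => intro pre a b; simp [dfsGo]
  | cons x t ih =>
      intro pre a b
      obtain ⟨r, c⟩ := x
      simp only [dfsGo]
      split
      · rw [max_assoc, ih]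
      · rw [ih]

theorem dfsGo_ge (k : Int) (pre post : List (Int × Int)) (best : Int) :
    best ≤ dfsGo k pre post best := by
  have h := dfsGo_max k post pre best best
  rw [max_self] at h
  rw [h]; exact le_max_left _ _

theorem dfsGo_cand (k r c : Int) (u : List (Int × Int)) :
    ∀ (pre v : List (Int × Int)) (best : Int), k ≥ r →
      1 + dfsGo (k - c) [] (pre ++ u ++ v) 0 ≤ dfsGo k pre (u ++ (r, c) :: v) best := by
  induction u with
  | nil =>
      intro pre v best hk
      simp only [List.nil_append, List.append_nil, dfsGo, if_pos hk]
      refine le_trans ?_ (dfsGo_ge _ _ _ _)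
      exact le_trans (le_max_right best _) (le_refl _)
  | cons x t ih =>
      intro pre v best hk
      obtain ⟨r', c'⟩ := x
      simp only [List.cons_append, dfsGo]
      have := ih (pre ++ [(r', c')]) v
        (if k ≥ r' then max best (1 + dfsGo (k - c') [] (pre ++ (t ++ (r, c) :: v)) 0) else best) hk
      simpa [List.append_assoc] using this

theorem chain_le_dfs (q : List (Int × Int)) :
    ∀ (L : List (Int × Int)) (k : Int), q.Perm L → chain k q ≤ dfsGo k [] L 0 := by
  induction q with
  | nil =>
      intro L k h
      simpa [chain] using dfsGo_ge k [] L 0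
  | cons x t ih =>
      intro L k h
      obtain ⟨r, c⟩ := x
      have hmem : (r, c) ∈ L := h.mem_iff.1 (List.mem_cons_self)
      have hperm : t.Perm (L.erase (r, c)) := (List.cons_perm_iff_perm_erase.1 h).2
      obtain ⟨u, v, _, hL, hEr⟩ := List.exists_erase_eq hmem
      simp only [chain]
      split
      · rename_i hk
        have h1 : chain (k - c) t ≤ dfsGo (k - c) [] (u ++ v) 0 := by
          have := ih (L.erase (r, c)) (k - c) hperm
          rwa [hEr] at this
        have h2 := dfsGo_cand k r c u [] v 0 hk
        rw [List.nil_append] at h2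
        rw [hL]
        omega
      · rw [hL]
        refine le_trans ?_ (dfsGo_ge _ _ _ _)
        exact le_refl 0

theorem dfsGo_attain (k : Int) (post : List (Int × Int)) :
    ∀ (pre : List (Int × Int)) (best : Int),
      dfsGo k pre post best = best ∨
      ∃ u r c v, post = u ++ (r, c) :: v ∧ k ≥ r ∧
        dfsGo k pre post best = 1 + dfsGo (k - c) [] (pre ++ u ++ v) 0 := by
  induction post with
  | nil => intro pre best; left; simp [dfsGo]
  | cons x t ih =>
      intro pre best
      obtain ⟨r, c⟩ := x
      simp only [dfsGo]
      rcases ih (pre ++ [(r, c)])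
          (if k ≥ r then max best (1 + dfsGo (k - c) [] (pre ++ t) 0) else best) with h | ⟨u, r', c', v, ht, hk, hv⟩
      · rw [h]
        split
        · rename_i hk
          rcases max_choice best (1 + dfsGo (k - c) [] (pre ++ t) 0) with hm | hm
          · exact Or.inl hm
          · exact Or.inr ⟨[], r, c, t, rfl, hk, by simpa using hm⟩
        · exact Or.inl rfl
      · refine Or.inr ⟨(r, c) :: u, r', c', v, by rw [ht]; rfl, hk, ?_⟩
        rw [hv]
        simp [List.append_assoc]

theorem mperm_nonneg (k : Int) (L : List (Int × Int)) : 0 ≤ mperm k L :=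
  fm_base _ _ _

theorem mperm_ge (k : Int) {q L : List (Int × Int)} (h : q.Perm L) :
    chain k q ≤ mperm k L :=
  fm_mem _ (List.mem_permutations.2 h) _

theorem mperm_step (k r c : Int) (u v : List (Int × Int)) (hk : k ≥ r) :
    1 + mperm (k - c) (u ++ v) ≤ mperm k (u ++ (r, c) :: v) := by
  have hmid : ((r, c) :: (u ++ v)).Perm (u ++ (r, c) :: v) := List.perm_middle.symm
  rcases fm_attain (chain (k - c)) (u ++ v).permutations 0 with h | ⟨q, hq, hv⟩
  · have h1 : chain k ((r, c) :: (u ++ v)) ≤ mperm k (u ++ (r, c) :: v) := mperm_ge k hmid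
    have h2 : chain k ((r, c) :: (u ++ v)) = 1 + chain (k - c) (u ++ v) := by
      simp [chain, if_pos hk]
    have h3 := chain_nonneg (k - c) (u ++ v)
    have h0 : mperm (k - c) (u ++ v) = 0 := h
    omega
  · have hqp : q.Perm (u ++ v) := List.mem_permutations.1 hq
    have hcons : ((r, c) :: q).Perm (u ++ (r, c) :: v) := (hqp.cons (r, c)).trans hmid
    have h1 : chain k ((r, c) :: q) ≤ mperm k (u ++ (r, c) :: v) := mperm_ge k hcons
    have h2 : chain k ((r, c) :: q) = 1 + chain (k - c) q := by
      simp [chain, if_pos hk]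
    have h0 : mperm (k - c) (u ++ v) = chain (k - c) q := hv
    omega

theorem dfs_le_mperm (n : Nat) :
    ∀ (L : List (Int × Int)) (k : Int), L.length ≤ n → dfsGo k [] L 0 ≤ mperm k L := by
  induction n with
  | zero =>
      intro L k hL
      have : L = [] := List.eq_nil_of_length_eq_zero (Nat.le_zero.1 hL)
      subst this
      simpa [dfsGo] using mperm_nonneg k []
  | succ n ih =>
      intro L k hL
      rcases dfsGo_attain k L [] 0 with h | ⟨u, r, c, v, hLe, hk, hv⟩
      · rw [h]; exact mperm_nonneg k L
      · subst hLe
        rw [List.nil_append] at hv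
        have hlen : (u ++ v).length ≤ n := by
          have := hL; simp [List.length_append] at this ⊢; omega
        have h1 := ih (u ++ v) (k - c) hlen
        have h2 := mperm_step k r c u v hk
        omega

theorem dfs_eq_mperm (k : Int) (L : List (Int × Int)) :
    dfsGo k [] L 0 = mperm k L := by
  refine le_antisymm (dfs_le_mperm L.length L k le_rfl) ?_
  refine fm_le _ _ _ _ (dfsGo_ge k [] L 0) ?_
  intro q hq
  exact chain_le_dfs q L k (List.mem_permutations.1 hq)

-- turning the nested fold of A into one fold over a flatMap
theorem foldl_foldl_flatMap {α β γ : Type} (f : β → α → β) (h : γ → List α)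
    (l : List γ) (b : β) :
    l.foldl (fun acc i => (h i).foldl f acc) b = (l.flatMap h).foldl f b := by
  induction l generalizing b with
  | nil => rfl
  | cons x t ih => simp [List.flatMap_cons, List.foldl_append, ih]

theorem solution_eq_mperm (k : Int) (ds : List (Int × Int)) :
    solution k ds = mperm k ds := by
  unfold solution
  rw [foldl_foldl_flatMap]
  apply le_antisymm
  · refine fm_le _ _ _ _ (mperm_nonneg k ds) ?_
    intro combo hc
    rcases List.mem_flatMap.1 hc with ⟨i, hi, hci⟩
    have hi0 : 0 ≤ i := (PySem.List.mem_pyRange_one.1 hi).1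
    rw [PySem.List.slice_zero_start, PySem.List.slice_to _ hi0] at hci
    have hperm : combo.Perm (ds.take i.toNat) := List.mem_permutations.1 hci
    have h1 : innerLoopA k 0 combo = chain k combo := by
      rw [innerLoopA_eq]; ring
    have h2 : chain k combo ≤ chain k (combo ++ ds.drop i.toNat) := chain_append_le _ _ _
    have h3 : (combo ++ ds.drop i.toNat).Perm ds := by
      have := hperm.append_right (ds.drop i.toNat)
      rwa [List.take_append_drop] at this
    have h4 := mperm_ge k h3
    omega
  · refine fm_le _ _ _ _ (fm_base _ _ _) ?_
    intro q hq
    have hperm : q.Perm ds := List.mem_permutations.1 hq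
    have hmem : q ∈ (PySem.List.pyRange 0 (PySem.List.len ds + 1) 1).flatMap
        (fun i => (PySem.List.slice ds (some 0) (some i)).permutations) := by
      refine List.mem_flatMap.2 ⟨(ds.length : Int), ?_, ?_⟩
      · refine PySem.List.mem_pyRange_one.2 ⟨Int.natCast_nonneg _, ?_⟩
        simp [PySem.List.len]
      · rw [PySem.List.slice_zero_start, PySem.List.slice_to _ (by positivity)]
        simp only [Int.toNat_natCast, List.take_length]
        exact List.mem_permutations.2 hperm
    have h := fm_mem (fun combo => innerLoopA k 0 combo) hmem (0 : Int)
    have h1 : innerLoopA k 0 q = chain k q := by rw [innerLoopA_eq]; ring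
    simp only at h
    omega

-- ===== VERDICT (by name: the statement is the Claim_ definition above) =====
theorem solution_spec : Claim_equal_solution := by
  intro k dungeons _
  unfold Spec_solution solution_alt
  rw [solution_eq_mperm, dfs_eq_mperm]
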